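-- pv_equiv track=rewrite | github.com/ariannamethod/microkarpathy | microkarpathy.py | dissect
-- ===== SOURCE A (Python) =====
-- STOPS = frozenset(
--     'the a an is are was were be been being have has had do does did will would '
--     'shall should may might can could and but or nor for yet so in on at to of by '
--     'with from what that this it i you he she we they my his her its our your their '
--     'me him us them not no very just also only'.split()
-- )
--
-- def dissect(prompt, vocab_set, words, embeds):
--     tokens = prompt.lower().split()
--     tokens = [t.strip('.,!?;:"\'-()[]') for t in tokens]
--     tokens = [t for t in tokens if t and t not in STOPS and len(t) > 1]
--     # keep original words — don't remap. the autopsy dissects YOU, not a proxy.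
--     if not tokens: tokens = [words[0]]
--     seen = set()
--     core = [w for w in tokens if not (w in seen or seen.add(w))]
--     return core[:5]
-- ===== SOURCE B (Python) =====
-- STOPS = frozenset(
--     'the a an is are was were be been being have has had do does did will would '
--     'shall should may might can could and but or nor for yet so in on at to of by '
--     'with from what that this it i you he she we they my his her its our your their '
--     'me him us them not no very just also only'.split()
-- )
--
-- _STRIP = '.,!?;:"\'-()[]'
--
-- def _next_kw(rest, acc):
--     # scan the remaining tokens for the next keyword not already chosen;
--     # return (keyword, tokens after it) or None
--     while rest:
--         t = rest[0].strip(_STRIP)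
--         rest = rest[1:]
--         if len(t) > 1 and t not in STOPS and t not in acc:
--             return t, rest
--     return None
--
-- def dissect(prompt, vocab_set, words, embeds):
--     # selection loop: up to five times, resume the scan where it stopped and
--     # pick the next keyword that is not already in the answer
--     rest = prompt.lower().split()
--     core = []
--     for _ in range(5):
--         found = _next_kw(rest, core)
--         if found is None:
--             break
--         t, rest = found
--         core.append(t)
--     return core if core else [words[0]]
-- ===== Notes on version B (the rewrite author's own statement) =====
-- stated objective: alternative
-- what changed: Replaces A's staged passes (strip map, filter comprehension, seen-set dedup comprehension, [:5] slice) by a selection loop that up to five times resumes a scanner over the remaining tokens to find the next keyword not already chosen, deduping against the answer itself with no seen set.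
-- outside the precondition, e.g. on dissect('the a', set(), [], []): A raises IndexError, B raises IndexError
import Mathlib
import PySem

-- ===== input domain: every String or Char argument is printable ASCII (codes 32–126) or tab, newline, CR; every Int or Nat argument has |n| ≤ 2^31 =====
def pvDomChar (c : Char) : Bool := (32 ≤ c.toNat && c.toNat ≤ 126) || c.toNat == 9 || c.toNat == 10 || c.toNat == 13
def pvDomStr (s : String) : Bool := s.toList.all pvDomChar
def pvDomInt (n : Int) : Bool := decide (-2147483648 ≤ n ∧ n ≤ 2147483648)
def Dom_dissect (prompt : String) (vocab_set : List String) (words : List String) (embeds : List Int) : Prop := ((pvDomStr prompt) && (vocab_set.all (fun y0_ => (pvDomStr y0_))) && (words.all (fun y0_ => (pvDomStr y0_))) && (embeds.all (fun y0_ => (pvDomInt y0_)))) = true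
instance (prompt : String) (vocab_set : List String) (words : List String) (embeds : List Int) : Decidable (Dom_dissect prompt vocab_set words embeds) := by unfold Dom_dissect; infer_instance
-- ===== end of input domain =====

-- B replaces A's staged strip/filter/dedup/[:5] passes by a selection loop: up to five
-- resumed scans, each finding the next keyword not already in the answer (objective: alternative).

-- shared module-level constants
def pvStops : List String := ["the","a","an","is","are","was","were","be","been","being","have","has","had","do","does","did","will","would","shall","should","may","might","can","could","and","but","or","nor","for","yet","so","in","on","at","to","of","by","with","from","what","that","this","it","i","you","he","she","we","they","my","his","her","its","our","your","their","me","him","us","them","not","no","very","just","also","only"]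
def pvStripSet : String := ".,!?;:\"'-()[]"
def pvKeep (t : String) : Bool := decide (t ≠ "") && decide (t ∉ pvStops) && decide (1 < PySem.Str.len t)

-- ===== PORT A =====
def dissect (prompt : String) (vocab_set : List String) (words : List String) (embeds : List Int) : List String :=
  let tokens := PySem.Str.split₀ (PySem.Str.lower prompt)
  let tokens := tokens.map (fun t => PySem.Str.stripChars t pvStripSet)
  let tokens := tokens.filter pvKeep
  let tokens := if tokens = [] then
      (match PySem.List.pyGet? words 0 with   -- words[0]; IndexError (words = []) is excluded by Pre_
       | some w => [w]
       | none => [])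
    else tokens
  let core := PySem.List.dedup tokens         -- the seen-set first-occurrence comprehension
  PySem.List.slice core none (some 5)         -- core[:5]

-- ===== PORT B =====
-- _next_kw: scan the remaining tokens for the next keyword not already chosen;
-- returns (keyword, tokens after it) or none
def nextKw : List String → List String → Option (String × List String)
  | [], _ => none
  | tok :: rest, acc =>
    let t := PySem.Str.stripChars tok pvStripSet
    if 1 < PySem.Str.len t ∧ t ∉ pvStops ∧ t ∉ acc then some (t, rest)
    else nextKw rest acc

-- the `for _ in range(5)` selection loop with its break
def pickLoop : Nat → List String → List String → List String
  | 0, _, core => core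
  | k+1, rest, core =>
    match nextKw rest core with
    | none => core                            -- break
    | some (t, rest') => pickLoop k rest' (core ++ [t])

def dissect_alt (prompt : String) (vocab_set : List String) (words : List String) (embeds : List Int) : List String :=
  let core := pickLoop 5 (PySem.Str.split₀ (PySem.Str.lower prompt)) []
  if core = [] then
    (match PySem.List.pyGet? words 0 with     -- words[0]; IndexError (words = []) is excluded by Pre_
     | some w => [w]
     | none => [])
  else core

-- ===== PRECONDITION & SPEC =====
-- Pre_ excludes exactly the inputs where both Pythons raise IndexError on words[0]:
-- no token of the prompt survives the strip/stopword/length filter AND words is empty.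
def Pre_dissect (prompt : String) (vocab_set : List String) (words : List String) (embeds : List Int) : Prop :=
  words ≠ [] ∨ ((PySem.Str.split₀ (PySem.Str.lower prompt)).map (fun t => PySem.Str.stripChars t pvStripSet)).filter pvKeep ≠ []
instance (prompt : String) (vocab_set : List String) (words : List String) (embeds : List Int) : Decidable (Pre_dissect prompt vocab_set words embeds) := by unfold Pre_dissect; infer_instance
def pvWitness_dissect : String × List String × List String × List Int := ("Autopsy of the code!", [], ["fallback"], [7])

def Spec_dissect (prompt : String) (vocab_set : List String) (words : List String) (embeds : List Int) (out : List String) : Prop := out = dissect_alt prompt vocab_set words embeds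
instance (prompt : String) (vocab_set : List String) (words : List String) (embeds : List Int) (out : List String) : Decidable (Spec_dissect prompt vocab_set words embeds out) := by unfold Spec_dissect; infer_instance

-- ===== CLAIM (what is proved, stated in full; the proofs are below) =====
def Claim_equal_dissect : Prop := ∀ (prompt : String) (vocab_set : List String) (words : List String) (embeds : List Int), Dom_dissect prompt vocab_set words embeds → Pre_dissect prompt vocab_set words embeds → Spec_dissect prompt vocab_set words embeds (dissect prompt vocab_set words embeds)

-- ===== LEMMAS AND PROOFS =====

-- first-occurrence dedup relative to an already-seen set
def dedupSeen : List String → List String → List String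
  | [], _ => []
  | t :: rest, seen => if t ∈ seen then dedupSeen rest seen else t :: dedupSeen rest (t :: seen)

theorem dedupSeen_congr (L : List String) : ∀ s s' : List String, (∀ x, x ∈ s ↔ x ∈ s') → dedupSeen L s = dedupSeen L s' := by
  induction L with
  | nil => intro s s' _; rfl
  | cons t rest ih =>
    intro s s' h
    simp only [dedupSeen]
    by_cases ht : t ∈ s
    · rw [if_pos ht, if_pos ((h t).mp ht)]; exact ih s s' h
    · rw [if_neg ht, if_neg (fun hc => ht ((h t).mpr hc))]
      congr 1
      exact ih _ _ (by intro x; simp [h x])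

theorem foldl_add_eq_dedupSeen (L : List String) : ∀ s : List String, L.foldl PySem.Set.add s = s ++ dedupSeen L s := by
  induction L with
  | nil => intro s; simp [dedupSeen]
  | cons t rest ih =>
    intro s
    simp only [List.foldl_cons, dedupSeen, PySem.Set.add]
    by_cases ht : t ∈ s
    · simp [ht, ih s]
    · rw [if_neg (by simpa using ht), if_neg ht, ih (s ++ [t])]
      rw [dedupSeen_congr rest (s ++ [t]) (t :: s) (by intro x; simp; tauto)]
      simp

theorem dedup_eq_dedupSeen (L : List String) : PySem.List.dedup L = dedupSeen L [] := by
  have : PySem.List.dedup L = L.foldl PySem.Set.add [] := by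
    simp [PySem.Set.ofList_eq_foldl]
  rw [this, foldl_add_eq_dedupSeen]; simp

-- nextKw's keep test equals pvKeep (len > 1 forces nonemptiness)
theorem keep_iff (t : String) : pvKeep t = true ↔ (1 < PySem.Str.len t ∧ t ∉ pvStops) := by
  constructor
  · intro h
    simp only [pvKeep, Bool.and_eq_true, decide_eq_true_eq] at h
    exact ⟨h.2, h.1.2⟩
  · intro h
    simp only [pvKeep, Bool.and_eq_true, decide_eq_true_eq]
    refine ⟨⟨?_, h.2⟩, h.1⟩
    intro he
    rw [he] at h
    simp [PySem.Str.len] at h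

-- characterisation of the scanner against the filtered token stream
theorem nextKw_none (toks : List String) : ∀ acc : List String, nextKw toks acc = none →
    dedupSeen ((toks.map (fun t => PySem.Str.stripChars t pvStripSet)).filter pvKeep) acc = [] := by
  induction toks with
  | nil => intro acc _; rfl
  | cons tok rest ih =>
    intro acc h
    simp only [nextKw] at h
    split at h
    · exact absurd h (by simp)
    · rename_i hc
      simp only [List.map_cons, List.filter_cons]
      by_cases hk : pvKeep (PySem.Str.stripChars tok pvStripSet) = true
      · have hmem : PySem.Str.stripChars tok pvStripSet ∈ acc := by
          rcases (keep_iff _).mp hk with ⟨h1, h2⟩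
          by_contra hm
          exact hc ⟨h1, h2, hm⟩
        rw [hk]
        simp only [if_true, dedupSeen, if_pos hmem]
        exact ih acc h
      · rw [Bool.not_eq_true] at hk
        rw [hk]
        simp only [Bool.false_eq_true, if_false]
        exact ih acc h

theorem nextKw_some (toks : List String) : ∀ (acc : List String) (t : String) (rest' : List String),
    nextKw toks acc = some (t, rest') →
    dedupSeen ((toks.map (fun s => PySem.Str.stripChars s pvStripSet)).filter pvKeep) acc
      = t :: dedupSeen ((rest'.map (fun s => PySem.Str.stripChars s pvStripSet)).filter pvKeep) (t :: acc) := by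
  induction toks with
  | nil => intro acc t rest' h; exact absurd h (by simp [nextKw])
  | cons tok rest ih =>
    intro acc t rest' h
    simp only [nextKw] at h
    split at h
    · rename_i hc
      obtain ⟨rfl, rfl⟩ : PySem.Str.stripChars tok pvStripSet = t ∧ rest = rest' := by
        simpa using h
      have hk : pvKeep (PySem.Str.stripChars tok pvStripSet) = true :=
        (keep_iff _).mpr ⟨hc.1, hc.2.1⟩
      simp only [List.map_cons, List.filter_cons, hk, if_true, dedupSeen, if_neg hc.2.2]
    · rename_i hc
      simp only [List.map_cons, List.filter_cons]
      by_cases hk : pvKeep (PySem.Str.stripChars tok pvStripSet) = true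
      · have hmem : PySem.Str.stripChars tok pvStripSet ∈ acc := by
          rcases (keep_iff _).mp hk with ⟨h1, h2⟩
          by_contra hm
          exact hc ⟨h1, h2, hm⟩
        rw [hk]
        simp only [if_true, dedupSeen, if_pos hmem]
        exact ih acc t rest' h
      · rw [Bool.not_eq_true] at hk
        rw [hk]
        simp only [Bool.false_eq_true, if_false]
        exact ih acc t rest' h

-- the selection loop computes the first-k elements of the capped dedup stream
theorem pickLoop_eq (k : Nat) : ∀ (toks core : List String),
    pickLoop k toks core
      = core ++ (dedupSeen ((toks.map (fun s => PySem.Str.stripChars s pvStripSet)).filter pvKeep) core).take k := by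
  induction k with
  | zero => intro toks core; simp [pickLoop]
  | succ k ih =>
    intro toks core
    simp only [pickLoop]
    cases hnk : nextKw toks core with
    | none => rw [nextKw_none toks core hnk]; simp
    | some p =>
      obtain ⟨t, rest'⟩ := p
      dsimp only
      rw [ih rest' (core ++ [t]), nextKw_some toks core t rest' hnk]
      rw [dedupSeen_congr ((rest'.map (fun s => PySem.Str.stripChars s pvStripSet)).filter pvKeep)
            (core ++ [t]) (t :: core) (by intro x; simp; tauto)]
      simp [List.take_succ_cons]

theorem slice_to_five (xs : List String) : PySem.List.slice xs none (some 5) = xs.take 5 := by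
  have := PySem.List.slice_to (xs := xs) (b := (5 : Int)) (by norm_num)
  simpa using this

-- ===== VERDICT (by name: the statement is the Claim_ definition above) =====
theorem dissect_spec : Claim_equal_dissect := by
  intro prompt vocab_set words embeds _ hpre
  simp only [Spec_dissect, dissect, dissect_alt]
  set F := ((PySem.Str.split₀ (PySem.Str.lower prompt)).map (fun t => PySem.Str.stripChars t pvStripSet)).filter pvKeep with hF
  have hgo : pickLoop 5 (PySem.Str.split₀ (PySem.Str.lower prompt)) [] = (dedupSeen F []).take 5 := by
    rw [pickLoop_eq 5 _ []]; simp [hF]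
  rw [hgo]
  by_cases hFe : F = []
  · -- no surviving tokens: both sides take the fallback [words[0]]
    rw [if_pos hFe, hFe]
    simp only [dedupSeen, List.take_nil]
    have hw : words ≠ [] := by
      rcases hpre with hw | hne
      · exact hw
      · exact absurd hFe hne
    cases words with
    | nil => exact absurd rfl hw
    | cons w ws =>
      simp [PySem.List.pyGet?, PySem.List.pyIdx?, PySem.List.dedup, PySem.Set.ofList, slice_to_five]
  · rw [if_neg hFe]
    rw [slice_to_five, dedup_eq_dedupSeen]
    have hne : (dedupSeen F []).take 5 ≠ [] := by
      cases hC : F with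
      | nil => exact absurd hC hFe
      | cons t r => simp [dedupSeen]
    rw [if_neg hne]
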